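-- pv_equiv track=rewrite | github.com/wah644/eyetalk | src/eyetrax/app/keyboard_demo.py | get_hovered_menu_option
-- ===== SOURCE A (Python) =====
-- NUM_MENU_BUTTONS = 5
--
-- MENU_BUTTON_WIDTH = 400
--
-- MENU_BUTTON_GAP = 15
--
-- def get_menu_button_bounds(option_index, screen_width, screen_height):
--     """Get the bounding box for a menu button (4-button layout)."""
--     n = NUM_MENU_BUTTONS
--     available_height = screen_height - (n - 1) * MENU_BUTTON_GAP
--     button_height = available_height // n
--     y1 = option_index * (button_height + MENU_BUTTON_GAP)
--     y2 = y1 + button_height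
--     x1 = (screen_width - MENU_BUTTON_WIDTH) // 2
--     x2 = x1 + MENU_BUTTON_WIDTH
--     return x1, y1, x2, y2
--
-- def get_hovered_menu_option(x, y, screen_width, screen_height):
--     if x is None or y is None:
--         return None
--     for i in range(NUM_MENU_BUTTONS):
--         x1, y1, x2, y2 = get_menu_button_bounds(i, screen_width, screen_height)
--         if x1 <= x <= x2 and y1 <= y <= y2:
--             return i
--     return None
-- ===== SOURCE B (Python) =====
-- NUM_MENU_BUTTONS = 5
--
-- MENU_BUTTON_WIDTH = 400
--
-- MENU_BUTTON_GAP = 15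
--
--
-- def get_hovered_menu_option(x, y, screen_width, screen_height):
--     if x is None or y is None:
--         return None
--     x1 = (screen_width - MENU_BUTTON_WIDTH) // 2
--     if not (x1 <= x <= x1 + MENU_BUTTON_WIDTH):
--         return None
--     button_height = (screen_height - (NUM_MENU_BUTTONS - 1) * MENU_BUTTON_GAP) // NUM_MENU_BUTTONS
--     if button_height < 0:
--         return None
--     stride = button_height + MENU_BUTTON_GAP
--     i, r = divmod(y, stride)
--     if 0 <= i < NUM_MENU_BUTTONS and r <= button_height:
--         return i
--     return None
-- ===== Notes on version B (the rewrite author's own statement) =====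
-- stated objective: simpler
-- what changed: B computes the hovered button index in closed form (divmod of y by the button stride plus a range/remainder check) instead of scanning all five buttons' bounding boxes.
import Mathlib
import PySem

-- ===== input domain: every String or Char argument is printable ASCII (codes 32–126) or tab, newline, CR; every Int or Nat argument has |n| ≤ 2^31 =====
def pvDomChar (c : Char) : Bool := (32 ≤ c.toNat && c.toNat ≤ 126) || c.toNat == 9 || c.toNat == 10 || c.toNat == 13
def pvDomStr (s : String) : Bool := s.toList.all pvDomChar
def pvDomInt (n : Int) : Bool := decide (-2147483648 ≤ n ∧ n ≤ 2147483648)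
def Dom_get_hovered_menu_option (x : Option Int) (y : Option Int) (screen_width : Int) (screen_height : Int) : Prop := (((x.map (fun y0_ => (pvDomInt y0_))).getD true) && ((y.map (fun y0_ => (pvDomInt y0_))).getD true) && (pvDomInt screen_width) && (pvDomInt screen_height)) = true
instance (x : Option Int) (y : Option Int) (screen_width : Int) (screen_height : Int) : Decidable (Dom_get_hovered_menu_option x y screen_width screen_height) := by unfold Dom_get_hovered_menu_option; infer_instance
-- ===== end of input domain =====

-- B replaces A's scan over the five buttons' bounding boxes by a closed-form
-- hit test: one divmod of y by the button stride plus a range/remainder check.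

-- ===== PORT A =====
def get_menu_button_bounds (option_index : Int) (screen_width : Int) (screen_height : Int) : Int × Int × Int × Int :=
  let n : Int := 5
  let available_height := screen_height - (n - 1) * 15
  let button_height := PySem.Int.floordiv available_height n
  let y1 := option_index * (button_height + 15)
  let y2 := y1 + button_height
  let x1 := PySem.Int.floordiv (screen_width - 400) 2
  let x2 := x1 + 400
  (x1, y1, x2, y2)

-- the 'for i in range(5)' loop with early return
def pvLoopA (xs : List Int) (xv yv screen_width screen_height : Int) : Option Int :=
  match xs with
  | [] => none
  | i :: rest =>
    let (x1, y1, x2, y2) := get_menu_button_bounds i screen_width screen_height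
    if x1 ≤ xv ∧ xv ≤ x2 ∧ y1 ≤ yv ∧ yv ≤ y2 then some i
    else pvLoopA rest xv yv screen_width screen_height

def get_hovered_menu_option (x : Option Int) (y : Option Int) (screen_width : Int) (screen_height : Int) : Option Int :=
  match x, y with
  | some xv, some yv => pvLoopA (PySem.List.pyRange 0 5 1) xv yv screen_width screen_height
  | _, _ => none

-- ===== PORT B =====
def get_hovered_menu_option_alt (x : Option Int) (y : Option Int) (screen_width : Int) (screen_height : Int) : Option Int :=
  match x with
  | none => none
  | some xv =>
  match y with
  | none => none
  | some yv =>
    let x1 := PySem.Int.floordiv (screen_width - 400) 2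
    if ¬ (x1 ≤ xv ∧ xv ≤ x1 + 400) then none
    else
      let button_height := PySem.Int.floordiv (screen_height - (5 - 1) * 15) 5
      if button_height < 0 then none
      else
        let stride := button_height + 15
        let i := PySem.Int.floordiv yv stride
        let r := PySem.Int.mod yv stride
        if 0 ≤ i ∧ i < 5 ∧ r ≤ button_height then some i else none

-- ===== PRECONDITION & SPEC =====
def Spec_get_hovered_menu_option (x : Option Int) (y : Option Int) (screen_width : Int) (screen_height : Int) (out : Option Int) : Prop := out = get_hovered_menu_option_alt x y screen_width screen_height
instance (x : Option Int) (y : Option Int) (screen_width : Int) (screen_height : Int) (out : Option Int) : Decidable (Spec_get_hovered_menu_option x y screen_width screen_height out) := by unfold Spec_get_hovered_menu_option; infer_instance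

-- ===== CLAIM (what is proved, stated in full; the proofs are below) =====
def Claim_equal_get_hovered_menu_option : Prop := ∀ (x : Option Int) (y : Option Int) (screen_width : Int) (screen_height : Int), Dom_get_hovered_menu_option x y screen_width screen_height → Spec_get_hovered_menu_option x y screen_width screen_height (get_hovered_menu_option x y screen_width screen_height)

-- ===== LEMMAS AND PROOFS =====

lemma pv_key (xv yv sw sh : Int) :
    get_hovered_menu_option (some xv) (some yv) sw sh
      = get_hovered_menu_option_alt (some xv) (some yv) sw sh := by
  have hrange : PySem.List.pyRange 0 5 1 = [0, 1, 2, 3, 4] := by decide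
  simp only [get_hovered_menu_option, get_hovered_menu_option_alt, hrange, pvLoopA,
    get_menu_button_bounds]
  set bh := PySem.Int.floordiv (sh - (5 - 1) * 15) 5 with hbh
  set x1 := PySem.Int.floordiv (sw - 400) 2 with hx1
  by_cases hxv : x1 ≤ xv ∧ xv ≤ x1 + 400
  · by_cases hbneg : bh < 0
    · split_ifs <;> first | rfl | (exfalso; omega)
    · rw [Int.not_lt] at hbneg
      have hs : (0 : Int) < bh + 15 := by omega
      have hq := PySem.Int.floordiv_mul_add_mod yv (bh + 15)
      have hr0 := PySem.Int.mod_nonneg yv hs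
      have hr1 := PySem.Int.mod_lt yv hs
      set q := PySem.Int.floordiv yv (bh + 15) with hqdef
      set r := PySem.Int.mod yv (bh + 15) with hrdef
      by_cases hqr : 0 ≤ q ∧ q < 5
      · obtain ⟨h1, h2⟩ := hqr
        interval_cases q <;> split_ifs <;> first | rfl | (exfalso; omega)
      · have hql : q ≤ -1 ∨ 5 ≤ q := by omega
        rcases hql with hql | hql
        · have hm : q * (bh + 15) ≤ (-1) * (bh + 15) :=
            mul_le_mul_of_nonneg_right hql (by omega)
          have hyv : yv < 0 := by omega
          split_ifs <;> first | rfl | (exfalso; omega)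
        · have hm : 5 * (bh + 15) ≤ q * (bh + 15) :=
            mul_le_mul_of_nonneg_right hql (by omega)
          have hyv : 4 * (bh + 15) + bh < yv := by omega
          split_ifs <;> first | rfl | (exfalso; omega)
  · split_ifs <;> first | rfl | (exfalso; omega)

-- ===== VERDICT (by name: the statement is the Claim_ definition above) =====
theorem get_hovered_menu_option_spec : Claim_equal_get_hovered_menu_option := by
  intro x y sw sh _hdom
  unfold Spec_get_hovered_menu_option
  cases x with
  | none => cases y <;> rfl
  | some xv =>
    cases y with
    | none => rfl
    | some yv => exact pv_key xv yv sw sh
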